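-- pv_equiv track=rewrite | github.com/ladydanicorn/python_strings | reviews.py | sentiment_tally
-- ===== SOURCE A (Python) =====
-- def sentiment_tally(reviews, positive_words, negative_words):
--     positive_count = 0
--     negative_count = 0
--
--     for review in reviews:
--         review_lower = review.lower()
--
--         for word in positive_words:
--             if word in review_lower:
--                 positive_count += 1
--
--         for word in negative_words:
--             if word in review_lower:
--                 negative_count += 1
--
--     return positive_count, negative_count
-- ===== SOURCE B (Python) =====
-- def sentiment_tally(reviews, positive_words, negative_words):
--     lengths = {len(w) for w in positive_words + negative_words}
--     positive_count = 0
--     negative_count = 0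
--     for review in reviews:
--         r = review.lower()
--         subs = {r[i:i+L] for L in lengths for i in range(len(r) - L + 1)}
--         positive_count += sum(w in subs for w in positive_words)
--         negative_count += sum(w in subs for w in negative_words)
--     return positive_count, negative_count
-- ===== Notes on version B (the rewrite author's own statement) =====
-- stated objective: alternative
-- what changed: B replaces A's per-(review,word) substring searches by building, once per review, a hash set of all substrings of the lowered review whose lengths occur among the sentiment words, and then counting each word by a single set-membership test.
import Mathlib
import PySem

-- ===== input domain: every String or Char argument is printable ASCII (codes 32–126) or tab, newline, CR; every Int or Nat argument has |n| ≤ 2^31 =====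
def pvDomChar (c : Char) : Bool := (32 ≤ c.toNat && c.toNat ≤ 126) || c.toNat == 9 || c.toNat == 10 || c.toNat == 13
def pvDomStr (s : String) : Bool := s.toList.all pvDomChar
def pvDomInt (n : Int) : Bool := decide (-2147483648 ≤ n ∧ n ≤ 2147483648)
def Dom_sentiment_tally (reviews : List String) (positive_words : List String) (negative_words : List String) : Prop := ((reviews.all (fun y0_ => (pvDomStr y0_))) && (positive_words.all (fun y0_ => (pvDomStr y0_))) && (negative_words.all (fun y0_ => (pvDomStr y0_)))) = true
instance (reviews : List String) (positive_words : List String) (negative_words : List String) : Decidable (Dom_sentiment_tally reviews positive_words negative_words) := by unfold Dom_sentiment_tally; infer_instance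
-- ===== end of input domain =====

-- ===== PORT A =====
-- Header: B replaces A's per-(review,word) substring searches by a per-review SET of all
-- substrings whose lengths occur among the words, then tests each word by set membership;
-- alternative algorithm/data structure, same exact result. Return value only (no mutation).
def sentiment_tally (reviews : List String) (positive_words : List String) (negative_words : List String) : List Int :=
  let st := reviews.foldl (fun (acc : Int × Int) review =>
      let review_lower := PySem.Str.lower review
      let p := positive_words.foldl (fun c w => if PySem.Str.isIn w review_lower then c + 1 else c) acc.1
      let n := negative_words.foldl (fun c w => if PySem.Str.isIn w review_lower then c + 1 else c) acc.2
      (p, n)) ((0 : Int), (0 : Int))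
  [st.1, st.2]

-- ===== PORT B =====
-- Source B: subs = {r[i:i+L] for L in lengths for i in range(len(r) - L + 1)} (a Python set,
-- consumed only by membership tests, so its order is irrelevant)
def pvSubs (r : List Char) (lens : List Nat) : PySem.Set (List Char) :=
  PySem.Set.ofList (lens.flatMap (fun L => (List.range (r.length + 1 - L)).map (fun i => (r.drop i).take L)))

def sentiment_tally_alt (reviews : List String) (positive_words : List String) (negative_words : List String) : List Int :=
  let lengths : PySem.Set Nat := PySem.Set.ofList ((positive_words ++ negative_words).map (fun w => w.toList.length))
  let st := reviews.foldl (fun (acc : Int × Int) review =>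
      let r := (PySem.Str.lower review).toList
      let subs := pvSubs r lengths
      (acc.1 + ((positive_words.countP (fun w => PySem.Set.contains subs w.toList) : Nat) : Int),
       acc.2 + ((negative_words.countP (fun w => PySem.Set.contains subs w.toList) : Nat) : Int))) ((0 : Int), (0 : Int))
  [st.1, st.2]

-- ===== PRECONDITION & SPEC =====
def Spec_sentiment_tally (reviews : List String) (positive_words : List String) (negative_words : List String) (out : List Int) : Prop := out = sentiment_tally_alt reviews positive_words negative_words
instance (reviews : List String) (positive_words : List String) (negative_words : List String) (out : List Int) : Decidable (Spec_sentiment_tally reviews positive_words negative_words out) := by unfold Spec_sentiment_tally; infer_instance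

-- ===== CLAIM (what is proved, stated in full; the proofs are below) =====
def Claim_equal_sentiment_tally : Prop := ∀ (reviews : List String) (positive_words : List String) (negative_words : List String), Dom_sentiment_tally reviews positive_words negative_words → Spec_sentiment_tally reviews positive_words negative_words (sentiment_tally reviews positive_words negative_words)

-- ===== LEMMAS AND PROOFS =====

-- A's inner word loop counts matching words
theorem pvInner (ws : List String) (rl : String) (a : Int) :
    ws.foldl (fun c w => if PySem.Str.isIn w rl then c + 1 else c) a
      = a + ((ws.countP (fun w => PySem.Str.isIn w rl) : Nat) : Int) := by
  induction ws generalizing a with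
  | nil => simp
  | cons w ws ih =>
    simp only [List.foldl_cons, List.countP_cons, ih]
    split_ifs <;> push_cast <;> ring_nf

-- any element of the substring set is an infix of r
theorem pvSubs_sub (r w : List Char) (lens : List Nat)
    (h : w ∈ pvSubs r lens) : w <:+: r := by
  unfold pvSubs at h
  rw [PySem.Set.mem_ofList, List.mem_flatMap] at h
  obtain ⟨L, -, h⟩ := h
  rw [List.mem_map] at h
  obtain ⟨i, -, rfl⟩ := h
  exact ((r.drop i).take_prefix L).isInfix.trans (r.drop_suffix i).isInfix

-- an infix of r whose length occurs in lens is in the substring set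
theorem pvSubs_mem (r w : List Char) (lens : List Nat)
    (hl : w.length ∈ lens) (h : w <:+: r) : w ∈ pvSubs r lens := by
  obtain ⟨j, hp⟩ : ∃ j, w <+: r.drop j := by
    obtain ⟨s, t, rfl⟩ := h
    exact ⟨s.length, by simp⟩
  unfold pvSubs
  rw [PySem.Set.mem_ofList, List.mem_flatMap]
  refine ⟨w.length, hl, ?_⟩
  rw [List.mem_map]
  have hlen : w.length + j ≤ r.length ∨ w = [] := by
    by_cases hj : j ≤ r.length
    · left; have := hp.length_le; simp [List.length_drop] at this; omega
    · right
      have : r.drop j = [] := List.drop_eq_nil_of_le (by omega)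
      simpa [this] using List.prefix_nil.mp (this ▸ hp)
  rcases hlen with hle | rfl
  · exact ⟨j, List.mem_range.mpr (by omega), (List.prefix_iff_eq_take.mp hp).symm⟩
  · exact ⟨0, List.mem_range.mpr (by simp), by simp⟩

-- membership in the substring set equals Python's 'w in r' for words whose length is covered
theorem pvSubs_contains (r : List Char) (w : String) (lens : List Nat)
    (hl : w.toList.length ∈ lens) :
    PySem.Set.contains (pvSubs r lens) w.toList = PySem.Chars.isIn w.toList r := by
  by_cases h : w.toList <:+: r
  · rw [(PySem.Set.contains_iff (pvSubs r lens) w.toList).mpr (pvSubs_mem r w.toList lens hl h),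
        (PySem.Chars.isIn_iff_infix w.toList r).mpr h]
  · have h1 : PySem.Set.contains (pvSubs r lens) w.toList = false := by
      rw [Bool.eq_false_iff]
      intro hc
      exact h (pvSubs_sub r w.toList lens ((PySem.Set.contains_iff _ _).mp hc))
    rw [h1, (PySem.Chars.isIn_eq_false_iff w.toList r).mpr h]

-- for every word of either list, its length is in the lengths set
theorem pvLens_mem (pos neg : List String) (w : String) (h : w ∈ pos ∨ w ∈ neg) :
    w.toList.length ∈ PySem.Set.ofList ((pos ++ neg).map (fun w => w.toList.length)) := by
  rw [PySem.Set.mem_ofList, List.mem_map]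
  exact ⟨w, List.mem_append.mpr h, rfl⟩

-- B's per-review count equals A's per-review count
theorem pvCountEq (words pos neg : List String) (rl : String)
    (hsub : ∀ w ∈ words, w ∈ pos ∨ w ∈ neg) :
    words.countP (fun w =>
        PySem.Set.contains (pvSubs rl.toList (PySem.Set.ofList ((pos ++ neg).map (fun w => w.toList.length)))) w.toList)
      = words.countP (fun w => PySem.Str.isIn w rl) := by
  apply List.countP_congr
  intro w hw
  rw [pvSubs_contains _ _ _ (pvLens_mem pos neg w (hsub w hw))]
  simp [PySem.Str.isIn_eq]

-- both outer folds reduce to the same accumulated counts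
theorem pvOuter (reviews : List String) (f g : String → Int) (a b : Int) :
    reviews.foldl (fun (acc : Int × Int) review => (acc.1 + f review, acc.2 + g review)) (a, b)
      = (a + (reviews.map f).sum, b + (reviews.map g).sum) := by
  induction reviews generalizing a b with
  | nil => simp
  | cons r rs ih =>
    simp only [List.foldl_cons, List.map_cons, List.sum_cons, ih]
    simp only [Prod.mk.injEq]
    constructor <;> ring

-- ===== VERDICT (by name: the statement is the Claim_ definition above) =====
theorem sentiment_tally_spec : Claim_equal_sentiment_tally := by
  intro reviews positive_words negative_words _
  unfold Spec_sentiment_tally sentiment_tally sentiment_tally_alt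
  simp only [pvInner]
  rw [pvOuter reviews
        (fun review => ((positive_words.countP (fun w => PySem.Str.isIn w (PySem.Str.lower review)) : Nat) : Int))
        (fun review => ((negative_words.countP (fun w => PySem.Str.isIn w (PySem.Str.lower review)) : Nat) : Int)),
      pvOuter reviews
        (fun review => ((positive_words.countP (fun w => PySem.Set.contains (pvSubs (PySem.Str.lower review).toList (PySem.Set.ofList ((positive_words ++ negative_words).map (fun w => w.toList.length)))) w.toList) : Nat) : Int))
        (fun review => ((negative_words.countP (fun w => PySem.Set.contains (pvSubs (PySem.Str.lower review).toList (PySem.Set.ofList ((positive_words ++ negative_words).map (fun w => w.toList.length)))) w.toList) : Nat) : Int))]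
  have h1 : List.map
      (fun review => ((positive_words.countP (fun w => PySem.Set.contains (pvSubs (PySem.Str.lower review).toList (PySem.Set.ofList ((positive_words ++ negative_words).map (fun w => w.toList.length)))) w.toList) : Nat) : Int)) reviews
    = List.map (fun review => ((positive_words.countP (fun w => PySem.Str.isIn w (PySem.Str.lower review)) : Nat) : Int)) reviews :=
    List.map_congr_left (fun rv _ => by
      rw [pvCountEq positive_words positive_words negative_words (PySem.Str.lower rv) (fun w hw => Or.inl hw)])
  have h2 : List.map
      (fun review => ((negative_words.countP (fun w => PySem.Set.contains (pvSubs (PySem.Str.lower review).toList (PySem.Set.ofList ((positive_words ++ negative_words).map (fun w => w.toList.length)))) w.toList) : Nat) : Int)) reviews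
    = List.map (fun review => ((negative_words.countP (fun w => PySem.Str.isIn w (PySem.Str.lower review)) : Nat) : Int)) reviews :=
    List.map_congr_left (fun rv _ => by
      rw [pvCountEq negative_words positive_words negative_words (PySem.Str.lower rv) (fun w hw => Or.inr hw)])
  rw [h1, h2]
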